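-- pv_equiv track=rewrite | github.com/Sparkle77ya/exam_sy | exam_2.py | replace_duplicate_str
-- ===== SOURCE A (Python) =====
-- def replace_duplicate_str(input_str, length=10):
--     result = list(input_str)
--
--     for i in range(len(result)):
--         s = result[i]
--         if s != '-':
--             for j in range(max(i - length, 0), i):
--                 if result[j] == s:
--                     result[i] = '-'
--                     break
--
--     return ''.join(result)
-- ===== SOURCE B (Python) =====
-- def replace_duplicate_str(input_str, length=10):
--     # One pass: remember the index of the last surviving occurrence of each char.
--     last = {}
--     out = []
--     for i, c in enumerate(input_str):
--         if c != '-':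
--             k = last.get(c)
--             if k is not None and k >= i - length:
--                 out.append('-')
--                 continue
--             last[c] = i
--         out.append(c)
--     return ''.join(out)
-- ===== Notes on version B (the rewrite author's own statement) =====
-- stated objective: faster
-- what changed: A rescans the up-to-`length` previous result chars for every position; B makes one pass keeping a dict from each char to the index of its last surviving occurrence, so the inner window scan disappears.
import Mathlib
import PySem

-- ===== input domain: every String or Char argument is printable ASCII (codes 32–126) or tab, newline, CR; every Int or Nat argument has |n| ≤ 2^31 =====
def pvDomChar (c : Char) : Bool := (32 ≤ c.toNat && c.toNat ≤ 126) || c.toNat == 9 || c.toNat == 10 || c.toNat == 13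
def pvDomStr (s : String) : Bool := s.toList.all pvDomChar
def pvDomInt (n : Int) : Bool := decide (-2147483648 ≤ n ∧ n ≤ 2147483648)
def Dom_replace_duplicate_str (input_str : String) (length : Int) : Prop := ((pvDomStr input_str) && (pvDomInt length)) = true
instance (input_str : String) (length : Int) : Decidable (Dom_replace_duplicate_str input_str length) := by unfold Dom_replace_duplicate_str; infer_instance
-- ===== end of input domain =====

-- B replaces A's inner window rescan by a dict of each char's last surviving index, one pass (objective: faster).

-- ===== PORT A =====
-- inner 'for j in range(max(i - length, 0), i): if result[j] == s: result[i] = '-'; break' — a scan with break;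
-- pyGetD with default ' ' is exact: every j of the range satisfies 0 ≤ j < i < len(result)
def pvAScan (result : List Char) (s : Char) : List Int → Bool
  | [] => false
  | j :: js => if PySem.List.pyGetD result j ' ' = s then true else pvAScan result s js

def pvAStep (length : Int) (result : List Char) (i : Nat) : List Char :=
  let s := result.getD i ' '   -- result[i]; i < len(result) always, so getD is exact
  if s ≠ '-' then
    if pvAScan result s (PySem.List.pyRange (max ((i : Int) - length) 0) (i : Int) 1) then
      result.set i '-'
    else result
  else result

def replace_duplicate_str (input_str : String) (length : Int) : String :=
  let result := input_str.toList
  String.ofList ((List.range result.length).foldl (pvAStep length) result)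

-- ===== PORT B =====
def pvBGo (length : Int) : List Char → Int → PySem.Dict Char Int → List Char → List Char
  | [], _, _, acc => acc.reverse
  | c :: cs, i, last, acc =>
    if c ≠ '-' then
      match PySem.Dict.get? last c with
      | some k =>
        if k ≥ i - length then pvBGo length cs (i + 1) last ('-' :: acc)
        else pvBGo length cs (i + 1) (last.insert c i) (c :: acc)
      | none => pvBGo length cs (i + 1) (last.insert c i) (c :: acc)
    else pvBGo length cs (i + 1) last (c :: acc)

def replace_duplicate_str_alt (input_str : String) (length : Int) : String :=
  String.ofList (pvBGo length input_str.toList 0 PySem.Dict.empty [])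

-- ===== PRECONDITION & SPEC =====
def Spec_replace_duplicate_str (input_str : String) (length : Int) (out : String) : Prop := out = replace_duplicate_str_alt input_str length
instance (input_str : String) (length : Int) (out : String) : Decidable (Spec_replace_duplicate_str input_str length out) := by unfold Spec_replace_duplicate_str; infer_instance

-- ===== CLAIM (what is proved, stated in full; the proofs are below) =====
def Claim_equal_replace_duplicate_str : Prop := ∀ (input_str : String) (length : Int), Dom_replace_duplicate_str input_str length → Spec_replace_duplicate_str input_str length (replace_duplicate_str input_str length)

-- ===== LEMMAS AND PROOFS =====

-- Common reference semantics: process the remaining chars, appending to the built prefix `out`.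
def pvHit (L : Int) (out : List Char) (c : Char) : Bool :=
  (List.range out.length).any (fun j => decide ((out.length : Int) - L ≤ (j : Int)) && (out.getD j ' ' == c))

def pvSpecGo (L : Int) (out : List Char) : List Char → List Char
  | [] => out
  | c :: cs => pvSpecGo L (out ++ [if c ≠ '-' ∧ pvHit L out c then '-' else c]) cs

lemma pvSpecGo_length (L : Int) (cs : List Char) : ∀ out : List Char,
    (pvSpecGo L out cs).length = out.length + cs.length := by
  induction cs with
  | nil => intro out; simp [pvSpecGo]
  | cons c cs ih => intro out; simp [pvSpecGo, ih]; omega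

lemma pvSpecGo_append (L : Int) (cs : List Char) : ∀ (out ds : List Char),
    pvSpecGo L out (cs ++ ds) = pvSpecGo L (pvSpecGo L out cs) ds := by
  induction cs with
  | nil => intro out ds; rfl
  | cons c cs ih => intro out ds; simp only [List.cons_append, pvSpecGo, ih]

lemma pvHit_iff (L : Int) (out : List Char) (c : Char) :
    pvHit L out c = true ↔
      ∃ j : Nat, j < out.length ∧ (out.length : Int) - L ≤ (j : Int) ∧ out.getD j ' ' = c := by
  simp only [pvHit, List.any_eq_true, List.mem_range, Bool.and_eq_true, decide_eq_true_eq,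
    beq_iff_eq]

lemma pvGetD_append_self (out : List Char) (x d : Char) :
    (out ++ [x]).getD out.length d = x := by
  rw [List.getD_append_right _ _ _ _ le_rfl]; simp

-- A's iterates
def pvAIter (L : Int) (orig : List Char) : Nat → List Char
  | 0 => orig
  | k + 1 => pvAStep L (pvAIter L orig k) k

lemma pvFoldl_range_eq_aIter (L : Int) (orig : List Char) (n : Nat) :
    (List.range n).foldl (pvAStep L) orig = pvAIter L orig n := by
  induction n with
  | zero => rfl
  | succ k ih => rw [List.range_succ, List.foldl_append, ih]; rfl

lemma pvAScan_iff (result : List Char) (s : Char) (js : List Int) :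
    pvAScan result s js = true ↔ ∃ j ∈ js, PySem.List.pyGetD result j ' ' = s := by
  induction js with
  | nil => simp [pvAScan]
  | cons j js ih =>
    simp only [pvAScan]
    split_ifs with h
    · simp [h]
    · simp [ih, h]

lemma pvA_eq_specGo (L : Int) (orig : List Char) : ∀ (k : Nat), k ≤ orig.length →
    pvAIter L orig k = pvSpecGo L [] (orig.take k) ++ orig.drop k := by
  intro k
  induction k with
  | zero => intro _; simp [pvAIter, pvSpecGo]
  | succ k ih =>
    intro hk
    have hk' : k < orig.length := by omega
    have IH := ih (le_of_lt hk')
    set P := pvSpecGo L [] (orig.take k) with hP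
    have hPlen : P.length = k := by
      rw [hP, pvSpecGo_length]; simp [List.length_take]; omega
    set c := orig[k] with hc
    set rest := orig.drop (k + 1) with hrest
    have hdrop : orig.drop k = c :: rest := List.drop_eq_getElem_cons hk'
    have hCur : (P ++ c :: rest).getD k ' ' = c := by
      rw [← hPlen, List.getD_append_right _ _ _ _ le_rfl]; simp
    have htake : orig.take (k + 1) = orig.take k ++ [c] := by
      rw [List.take_add_one]; simp [List.getElem?_eq_getElem hk', hc]
    have hRHS : pvSpecGo L [] (orig.take (k + 1)) =
        P ++ [if c ≠ '-' ∧ pvHit L P c then '-' else c] := by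
      rw [htake, pvSpecGo_append, ← hP]; rfl
    have hscan : pvAScan (P ++ c :: rest) c
        (PySem.List.pyRange (max ((k : Int) - L) 0) (k : Int) 1) = pvHit L P c := by
      rw [Bool.eq_iff_iff, pvAScan_iff, pvHit_iff, hPlen]
      constructor
      · rintro ⟨j, hj, hget⟩
        rw [PySem.List.mem_pyRange_one] at hj
        have h0 : 0 ≤ j := by omega
        have hjk : j.toNat < k := by omega
        refine ⟨j.toNat, hjk, by omega, ?_⟩
        rw [PySem.List.pyGetD_of_nonneg _ _ h0, List.getD_append _ _ _ _ (by omega)] at hget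
        exact hget
      · rintro ⟨j, hj, hwin, hget⟩
        refine ⟨(j : Int), ?_, ?_⟩
        · rw [PySem.List.mem_pyRange_one]; omega
        · rw [PySem.List.pyGetD_of_nonneg _ _ (by omega), Int.toNat_natCast,
            List.getD_append _ _ _ _ (by omega : j < P.length)]
          exact hget
    show pvAStep L (pvAIter L orig k) k = _
    rw [IH, hdrop, hRHS]
    simp only [pvAStep]
    rw [hCur, hscan]
    by_cases hcd : c = '-'
    · simp [hcd]
    · by_cases hhit : pvHit L P c = true
      · have hset : (P ++ c :: rest).set k '-' = P ++ '-' :: rest := by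
          rw [← hPlen, List.set_append_right _ _ le_rfl]
          simp
        simp [hcd, hhit, hset]
      · simp [hcd, hhit]

-- B's dict invariant: `last` maps each non-'-' char to the index of its last surviving occurrence in `out`
def pvInv (out : List Char) (last : PySem.Dict Char Int) : Prop :=
  ∀ c : Char, c ≠ '-' →
    (∀ m : Int, last.get? c = some m →
        0 ≤ m ∧ m.toNat < out.length ∧ out.getD m.toNat ' ' = c ∧
        ∀ j : Nat, m.toNat < j → j < out.length → out.getD j ' ' ≠ c)
    ∧ (last.get? c = none → ∀ j : Nat, j < out.length → out.getD j ' ' ≠ c)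

lemma pvInv_append_dash (out : List Char) (last : PySem.Dict Char Int)
    (h : pvInv out last) : pvInv (out ++ ['-']) last := by
  intro c hc
  obtain ⟨hsome, hnone⟩ := h c hc
  have hnew : ∀ j : Nat, j < (out ++ ['-']).length → out.length ≤ j →
      (out ++ ['-']).getD j ' ' ≠ c := by
    intro j hj1 hj2
    have : j = out.length := by simp at hj1; omega
    subst this
    rw [pvGetD_append_self]
    exact fun h => hc h.symm
  refine ⟨?_, ?_⟩
  · intro m hm
    obtain ⟨h0, hlt, hget, hmax⟩ := hsome m hm
    refine ⟨h0, by simp; omega, ?_, ?_⟩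
    · rw [List.getD_append _ _ _ _ hlt]; exact hget
    · intro j hj1 hj2
      by_cases hjl : j < out.length
      · rw [List.getD_append _ _ _ _ hjl]; exact hmax j hj1 hjl
      · exact hnew j hj2 (by omega)
  · intro hres j hj
    by_cases hjl : j < out.length
    · rw [List.getD_append _ _ _ _ hjl]; exact hnone hres j hjl
    · exact hnew j hj (by omega)

lemma pvInv_append_keep (out : List Char) (last : PySem.Dict Char Int) (c : Char)
    (h : pvInv out last) : pvInv (out ++ [c]) (last.insert c (out.length : Int)) := by
  intro c' hc'
  by_cases hcc : c' = c
  · subst hcc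
    refine ⟨?_, ?_⟩
    · intro m hm
      rw [PySem.Dict.get?_insert_self] at hm
      injection hm with hm
      subst hm
      refine ⟨Int.natCast_nonneg _, by simp, ?_, ?_⟩
      · rw [Int.toNat_natCast, pvGetD_append_self]
      · intro j hj1 hj2
        rw [Int.toNat_natCast] at hj1
        simp at hj2
        omega
    · intro hm
      rw [PySem.Dict.get?_insert_self] at hm
      simp at hm
  · obtain ⟨hsome, hnone⟩ := h c' hc'
    rw [show (last.insert c (out.length : Int)).get? c' = last.get? c' from
      PySem.Dict.get?_insert_of_ne _ _ hcc]
    have hnew : ∀ j : Nat, j < (out ++ [c]).length → out.length ≤ j →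
        (out ++ [c]).getD j ' ' ≠ c' := by
      intro j hj1 hj2
      have : j = out.length := by simp at hj1; omega
      subst this
      rw [pvGetD_append_self]
      exact fun h => hcc h.symm
    refine ⟨?_, ?_⟩
    · intro m hm
      obtain ⟨h0, hlt, hget, hmax⟩ := hsome m hm
      refine ⟨h0, by simp; omega, ?_, ?_⟩
      · rw [List.getD_append _ _ _ _ hlt]; exact hget
      · intro j hj1 hj2
        by_cases hjl : j < out.length
        · rw [List.getD_append _ _ _ _ hjl]; exact hmax j hj1 hjl
        · exact hnew j hj2 (by omega)
    · intro hres j hj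
      by_cases hjl : j < out.length
      · rw [List.getD_append _ _ _ _ hjl]; exact hnone hres j hjl
      · exact hnew j hj (by omega)

lemma pvHit_iff_dict (L : Int) (out : List Char) (last : PySem.Dict Char Int) (c : Char)
    (hc : c ≠ '-') (hinv : pvInv out last) :
    pvHit L out c = true ↔ ∃ m, last.get? c = some m ∧ (out.length : Int) - L ≤ m := by
  obtain ⟨hsome, hnone⟩ := hinv c hc
  rw [pvHit_iff]
  constructor
  · rintro ⟨j, hj, hwin, hget⟩
    cases hg : last.get? c with
    | none => exact absurd hget (hnone hg j hj)
    | some m =>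
      obtain ⟨h0, hlt, _, hmax⟩ := hsome m hg
      refine ⟨m, rfl, ?_⟩
      by_cases hjm : m.toNat < j
      · exact absurd hget (hmax j hjm hj)
      · omega
  · rintro ⟨m, hg, hwin⟩
    obtain ⟨h0, hlt, hget, _⟩ := hsome m hg
    exact ⟨m.toNat, hlt, by omega, hget⟩

lemma pvB_eq_specGo (L : Int) (cs : List Char) : ∀ (out : List Char) (last : PySem.Dict Char Int),
    pvInv out last →
    pvBGo L cs (out.length : Int) last out.reverse = pvSpecGo L out cs := by
  induction cs with
  | nil => intro out last _; simp [pvBGo, pvSpecGo]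
  | cons c cs ih =>
    intro out last hinv
    have hacc : ∀ x : Char, x :: out.reverse = (out ++ [x]).reverse := by simp
    have hlen : ∀ x : Char, (out.length : Int) + 1 = ((out ++ [x]).length : Int) := by
      intro x; simp
    by_cases hc : c = '-'
    · subst hc
      rw [pvBGo, if_neg (by simp)]
      rw [hacc '-', hlen '-', ih _ _ (pvInv_append_dash out last hinv)]
      simp [pvSpecGo]
    · cases hg : last.get? c with
      | some m =>
        by_cases hwin : m ≥ (out.length : Int) - L
        · have hhit : pvHit L out c = true :=
            (pvHit_iff_dict L out last c hc hinv).mpr ⟨m, hg, hwin⟩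
          rw [pvBGo, if_pos hc, hg]
          simp only [ge_iff_le, if_pos hwin]
          rw [hacc '-', hlen '-', ih _ _ (pvInv_append_dash out last hinv)]
          simp [pvSpecGo, hc, hhit]
        · have hhit : pvHit L out c = false := by
            rw [Bool.eq_false_iff, Ne, pvHit_iff_dict L out last c hc hinv]
            rintro ⟨m', hg', hwin'⟩
            rw [hg] at hg'
            injection hg' with hg'
            exact hwin (hg' ▸ hwin')
          rw [pvBGo, if_pos hc, hg]
          simp only [ge_iff_le, if_neg hwin]
          rw [hacc c, hlen c, ih _ _ (pvInv_append_keep out last c hinv)]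
          simp [pvSpecGo, hc, hhit]
      | none =>
        have hhit : pvHit L out c = false := by
          rw [Bool.eq_false_iff, Ne, pvHit_iff_dict L out last c hc hinv]
          rintro ⟨m', hg', _⟩
          rw [hg] at hg'
          simp at hg'
        rw [pvBGo, if_pos hc, hg]
        rw [hacc c, hlen c, ih _ _ (pvInv_append_keep out last c hinv)]
        simp [pvSpecGo, hc, hhit]

-- ===== VERDICT (by name: the statement is the Claim_ definition above) =====
theorem replace_duplicate_str_spec : Claim_equal_replace_duplicate_str := by
  intro s L _
  unfold Spec_replace_duplicate_str replace_duplicate_str replace_duplicate_str_alt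
  have hA := pvA_eq_specGo L s.toList s.toList.length le_rfl
  have hB := pvB_eq_specGo L s.toList [] PySem.Dict.empty (by
    intro c hc
    refine ⟨?_, ?_⟩
    · intro m hm; simp [PySem.Dict.get?, PySem.Dict.empty] at hm
    · intro _ j hj; simp at hj)
  simp only [List.length_nil, Nat.cast_zero, List.reverse_nil] at hB
  simp only [pvFoldl_range_eq_aIter, hA, List.take_length, List.drop_length, List.append_nil]
  exact congrArg String.ofList hB.symm
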